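-- pv_equiv track=rewrite | github.com/SzymonIwaniuk/wdi-2024-2025 | Zestaw3/zad97.py | solve
-- ===== SOURCE A (Python) =====
-- def solve(T1, T2):
--     n = len(T1)
--     out_idx = 0
--     indexes = [0 for _ in range(n)]  # Keep track of the current index in each row
--     last_inserted = None  # Track the last inserted value to avoid duplicates
--
--     while True:
--         min_row = -1
--         min_value = float('inf')
--
--         # Find the minimum value among the rows that have not been fully processed
--         for r in range(n):
--             if indexes[r] < len(T1[r]) and T1[r][indexes[r]] < min_value:
--                 min_value = T1[r][indexes[r]]
--                 min_row = r
--
--         if min_row == -1:  # No more elements left to process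
--             break
--
--         # Only add min_value to T2 if it's different from the last inserted value
--         if min_value != last_inserted:
--             T2[out_idx] = min_value
--             out_idx += 1
--             last_inserted = min_value
--
--         # Increment the index of the row that had the minimum value
--         indexes[min_row] += 1
--
--     return T2
-- ===== SOURCE B (Python) =====
-- # B: k-way merge keeping the active row heads in a bisect-sorted list (value, row, rest)
-- # instead of re-scanning every row per step; dedup while popping, then overlay onto T2.
-- # Like A, mutates T2 in place (slice assignment vs. A's per-index writes).
-- from bisect import insort
--
-- def solve(T1, T2):
--     heads = []
--     for r, row in enumerate(T1):
--         if row: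
--             insort(heads, (row[0], r, row[1:]))
--     merged = []
--     while heads:
--         v, r, rest = heads.pop(0)
--         if not merged or merged[-1] != v:
--             merged.append(v)
--         if rest:
--             insort(heads, (rest[0], r, rest[1:]))
--     T2[:len(merged)] = merged
--     return T2
-- ===== Notes on version B (the rewrite author's own statement) =====
-- stated objective: faster
-- what changed: A rescans every row per output step to find the minimal head; B keeps the active row heads in a bisect-sorted list (value, row, rest), popping the front and re-inserting the advanced head, dedups while popping and overlays the merged list onto T2 by slice assignment.
-- outside the precondition, e.g. on solve([[2, 2, 1]], [0, 0]): A returns [2, 1], B returns [2, 1]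
import Mathlib
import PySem

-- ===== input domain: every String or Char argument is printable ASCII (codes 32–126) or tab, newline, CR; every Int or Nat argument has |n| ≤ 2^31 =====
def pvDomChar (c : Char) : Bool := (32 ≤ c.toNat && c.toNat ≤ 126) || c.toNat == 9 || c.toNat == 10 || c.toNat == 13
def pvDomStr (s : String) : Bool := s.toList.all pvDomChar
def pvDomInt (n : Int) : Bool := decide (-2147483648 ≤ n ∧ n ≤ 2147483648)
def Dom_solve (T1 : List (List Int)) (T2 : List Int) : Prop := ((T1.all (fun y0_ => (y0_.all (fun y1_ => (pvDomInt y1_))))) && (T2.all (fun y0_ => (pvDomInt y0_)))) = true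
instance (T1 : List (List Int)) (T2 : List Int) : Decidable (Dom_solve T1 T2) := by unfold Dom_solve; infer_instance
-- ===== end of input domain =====

-- B replaces A's per-step rescan of all rows by a bisect-sorted list of row heads, deduplicating
-- while popping and overlaying the merged list onto T2 (objective: faster, constant-factor).
-- Both A and B mutate T2 in place (A by index writes, B by slice assignment); the equivalence
-- proved here is about the returned list.

-- ===== PORT A =====
-- float('inf') is modelled by `none` (nothing is < it); min_row is an Int (-1 sentinel, as in A).
def pvLtInf (v : Int) (m : Option Int) : Bool :=
  match m with
  | none => true
  | some w => v < w

-- one step of A's inner `for r in range(n)` scan; Python's short-circuit `and` = nested ifs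
def pvScanStep (T1 : List (List Int)) (idxs : List Nat) (acc : Int × Option Int) (r : Nat) :
    Int × Option Int :=
  let row := T1.getD r []
  let i := idxs.getD r 0
  if i < row.length then
    (if pvLtInf (row.getD i 0) acc.2 then ((r : Int), some (row.getD i 0)) else acc)
  else acc

-- A's `while True` loop; fuel is an upper bound on the iteration count (sum of row lengths + 1).
-- `T2.set out v` is Python's `T2[out] = v`; Python raises IndexError when out ≥ len(T2) —
-- such inputs are excluded by Pre_solve (List.set is then a no-op, but nothing is claimed there).
def pvLoopA (T1 : List (List Int)) :
    Nat → List Nat → Nat → Option Int → List Int → List Int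
  | 0, _, _, _, T2 => T2
  | fuel+1, idxs, outIdx, last, T2 =>
    let m := (List.range T1.length).foldl (pvScanStep T1 idxs) (-1, none)
    if m.1 = -1 then T2
    else
      let v := m.2.getD 0
      let idxs' := idxs.set m.1.toNat (idxs.getD m.1.toNat 0 + 1)
      if some v ≠ last then
        pvLoopA T1 fuel idxs' (outIdx + 1) (some v) (T2.set outIdx v)
      else
        pvLoopA T1 fuel idxs' outIdx last T2

def solve (T1 : List (List Int)) (T2 : List Int) : List Int :=
  pvLoopA T1 ((T1.map List.length).sum + 1) (List.replicate T1.length 0) 0 none T2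

-- ===== PORT B =====
-- heads entry = (value, row index, rest of that row); Python tuple `<` on the first two
-- components (rows are pairwise distinct in heads, so the third is never compared).
def pvLexLt (x y : Int × Int × List Int) : Bool :=
  x.1 < y.1 || (x.1 == y.1 && x.2.1 < y.2.1)

-- bisect.insort: insert x before the first strictly larger element
def pvInsort (x : Int × Int × List Int) :
    List (Int × Int × List Int) → List (Int × Int × List Int)
  | [] => [x]
  | y :: ys => if pvLexLt x y then x :: y :: ys else y :: pvInsort x ys

-- `for r, row in enumerate(T1): if row: insort(heads, (row[0], r, row[1:]))`
def pvInitHeads (T1 : List (List Int)) : List (Int × Int × List Int) :=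
  (PySem.List.enumerate T1).foldl
    (fun hs p =>
      match p.2 with
      | [] => hs
      | w :: ws => pvInsort (w, p.1, ws) hs) []

-- `while heads:` pop the least head, dedup-append, re-insert the rest's head
def pvLoopB : Nat → List (Int × Int × List Int) → List Int → List Int
  | 0, _, merged => merged
  | _+1, [], merged => merged
  | fuel+1, (v, r, rest) :: hs, merged =>
    let merged' := if merged.getLast? ≠ some v then merged ++ [v] else merged
    match rest with
    | [] => pvLoopB fuel hs merged'
    | w :: ws => pvLoopB fuel (pvInsort (w, r, ws) hs) merged'

def solve_alt (T1 : List (List Int)) (T2 : List Int) : List Int :=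
  let merged := pvLoopB ((T1.map List.length).sum) (pvInitHeads T1) []
  -- `T2[:len(merged)] = merged; return T2`
  merged ++ T2.drop merged.length

-- ===== PRECONDITION & SPEC =====
-- Pre_ excludes exactly the inputs on which A raises IndexError on its natural domain of sorted
-- rows (there A writes one slot per distinct value, so it returns iff the distinct-value count of
-- the elements fits in T2); for unsorted rows — outside a k-way merge's natural domain — only the
-- always-safe sufficient bound (total element count ≤ len T2) is kept, which also excludes some
-- unsorted inputs on which A still returns (duplicates shrinking the output to fit; see cites).
def Pre_solve (T1 : List (List Int)) (T2 : List Int) : Prop :=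
  ((∀ row ∈ T1, row.Pairwise (· ≤ ·)) ∧ T1.flatten.dedup.length ≤ T2.length)
    ∨ (T1.map List.length).sum ≤ T2.length
instance (T1 : List (List Int)) (T2 : List Int) : Decidable (Pre_solve T1 T2) := by
  unfold Pre_solve; infer_instance

def pvWitness_solve : List (List Int) × List Int := ([[1, 2], [1, 3]], [0, 0, 0])

def Spec_solve (T1 : List (List Int)) (T2 : List Int) (out : List Int) : Prop := out = solve_alt T1 T2
instance (T1 : List (List Int)) (T2 : List Int) (out : List Int) : Decidable (Spec_solve T1 T2 out) := by unfold Spec_solve; infer_instance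

-- ===== CLAIM (what is proved, stated in full; the proofs are below) =====
def Claim_equal_solve : Prop := ∀ (T1 : List (List Int)) (T2 : List Int), Dom_solve T1 T2 → Pre_solve T1 T2 → Spec_solve T1 T2 (solve T1 T2)

-- ===== LEMMAS AND PROOFS =====

-- the multiset of active heads of A's state (value, row, rest), in row order
def activeF (T1 : List (List Int)) (idxs : List Nat) (r : Nat) : Option (Int × Int × List Int) :=
  let row := T1.getD r []
  let i := idxs.getD r 0
  if i < row.length then some (row.getD i 0, (r : Int), row.drop (i + 1)) else none

def activeList (T1 : List (List Int)) (idxs : List Nat) : List (Int × Int × List Int) :=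
  (List.range T1.length).filterMap (activeF T1 idxs)

def ltP (x y : Int × Int × List Int) : Prop := pvLexLt x y = true

-- weight = number of elements still to be popped through a head entry
def wsum (hs : List (Int × Int × List Int)) : Nat :=
  (hs.map (fun e => 1 + e.2.2.length)).sum

def pvSel (acc : Int × Option Int) (e : Int × Int × List Int) : Int × Option Int :=
  if pvLtInf e.1 acc.2 then (e.2.1, some e.1) else acc

-- pure output sequence of the merge loop (the values B appends / A writes), fuel-indexed
def outB : Nat → List (Int × Int × List Int) → Option Int → List Int
  | 0, _, _ => []
  | _+1, [], _ => []
  | fuel+1, (v, r, rest) :: hs, last =>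
    let emit := if last ≠ some v then [v] else []
    match rest with
    | [] => emit ++ outB fuel hs (some v)
    | w :: ws => emit ++ outB fuel (pvInsort (w, r, ws) hs) (some v)

-- sequential per-index writes T2[i] = v, T2[i+1] = v', … with List.set semantics
def setSeq : List Int → Nat → List Int → List Int
  | T2, _, [] => T2
  | T2, i, v :: vs => setSeq (T2.set i v) (i+1) vs

def entryGood (e : Int × Int × List Int) : Prop :=
  e.2.2.Pairwise (· ≤ ·) ∧ ∀ x ∈ e.2.2, e.1 ≤ x

def headsVals (hs : List (Int × Int × List Int)) : List Int :=
  hs.flatMap (fun e => e.1 :: e.2.2)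

theorem insort_perm (x : Int × Int × List Int) (l : List (Int × Int × List Int)) :
    (pvInsort x l).Perm (x :: l) := by
  induction l with
  | nil => simp [pvInsort]
  | cons y ys ih =>
    simp only [pvInsort]
    split
    · exact List.Perm.refl _
    · exact (List.Perm.cons y ih).trans (List.Perm.swap x y ys)

theorem lex_total (x y : Int × Int × List Int) (h : x.2.1 ≠ y.2.1) :
    pvLexLt x y = true ∨ pvLexLt y x = true := by
  simp only [pvLexLt, Bool.or_eq_true, Bool.and_eq_true, decide_eq_true_eq, beq_iff_eq]
  rcases lt_trichotomy x.1 y.1 with h1 | h1 | h1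
  · exact Or.inl (Or.inl h1)
  · rcases lt_or_gt_of_ne h with h2 | h2
    · exact Or.inl (Or.inr ⟨h1, h2⟩)
    · exact Or.inr (Or.inr ⟨h1.symm, h2⟩)
  · exact Or.inr (Or.inl h1)

theorem lex_trans {x y z : Int × Int × List Int} (h1 : ltP x y) (h2 : ltP y z) : ltP x z := by
  simp only [ltP, pvLexLt, Bool.or_eq_true, Bool.and_eq_true, decide_eq_true_eq,
    beq_iff_eq] at *
  rcases h1 with h1 | ⟨h1, h1'⟩ <;> rcases h2 with h2 | ⟨h2, h2'⟩
  · exact Or.inl (h1.trans h2)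
  · exact Or.inl (h2 ▸ h1)
  · exact Or.inl (h1 ▸ h2)
  · exact Or.inr ⟨h1.trans h2, h1'.trans h2'⟩

theorem insort_sorted (x : Int × Int × List Int) (l : List (Int × Int × List Int))
    (hs : l.Pairwise ltP) (hne : ∀ y ∈ l, x.2.1 ≠ y.2.1) :
    (pvInsort x l).Pairwise ltP := by
  induction l with
  | nil => simp [pvInsort]
  | cons y ys ih =>
    rcases List.pairwise_cons.mp hs with ⟨hy, hys⟩
    simp only [pvInsort]
    split
    · rename_i hlt
      refine List.pairwise_cons.mpr ⟨?_, hs⟩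
      intro z hz
      rcases List.mem_cons.mp hz with hz | hz
      · subst hz; exact hlt
      · exact lex_trans hlt (hy z hz)
    · rename_i hnlt
      refine List.pairwise_cons.mpr ⟨?_, ih hys (fun z hz => hne z (List.mem_cons_of_mem _ hz))⟩
      intro z hz
      have hz2 := (insort_perm x ys).mem_iff.mp hz
      rcases List.mem_cons.mp hz2 with hz' | hz'
      · rcases lex_total x y (hne y List.mem_cons_self) with h | h
        · exact absurd h (by simpa using hnlt)
        · rw [hz']; exact h
      · exact hy z hz'

theorem ltP_not_fst_lt {h x : Int × Int × List Int} (hl : ltP h x) : ¬ x.1 < h.1 := by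
  simp only [ltP, pvLexLt, Bool.or_eq_true, Bool.and_eq_true, decide_eq_true_eq, beq_iff_eq] at hl
  rcases hl with h1 | ⟨h1, _⟩ <;> omega

theorem ltP_fst_le {h x : Int × Int × List Int} (hl : ltP h x) : h.1 ≤ x.1 := by
  simp only [ltP, pvLexLt, Bool.or_eq_true, Bool.and_eq_true, decide_eq_true_eq, beq_iff_eq] at hl
  rcases hl with h1 | ⟨h1, _⟩ <;> omega

theorem ltP_fst_lt {h c : Int × Int × List Int} (hl : ltP h c) (hr : c.2.1 < h.2.1) :
    h.1 < c.1 := by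
  simp only [ltP, pvLexLt, Bool.or_eq_true, Bool.and_eq_true, decide_eq_true_eq, beq_iff_eq] at hl
  rcases hl with h1 | ⟨h1, h2⟩
  · exact h1
  · omega

theorem fold_keep (L : List (Int × Int × List Int)) (a : Int × Option Int)
    (h : ∀ x ∈ L, pvLtInf x.1 a.2 = false) : L.foldl pvSel a = a := by
  induction L with
  | nil => rfl
  | cons c L' ih =>
    have hc := h c List.mem_cons_self
    have hstep : pvSel a c = a := by simp [pvSel, hc]
    simp only [List.foldl_cons, hstep]
    exact ih (fun x hx => h x (List.mem_cons_of_mem _ hx))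

theorem min_keep (L' : List (Int × Int × List Int)) (c : Int × Int × List Int)
    (hmin : ∀ x ∈ L', x = c ∨ ltP c x) (hcL : ∀ x ∈ L', c.2.1 < x.2.1) :
    L'.foldl pvSel (c.2.1, some c.1) = (c.2.1, some c.1) := by
  apply fold_keep
  intro x hx
  rcases hmin x hx with rfl | hlt
  · exact absurd (hcL x hx) (lt_irrefl _)
  · have := ltP_not_fst_lt hlt
    simp [pvLtInf, this]

theorem fold_min_acc (L : List (Int × Int × List Int)) (h : Int × Int × List Int) :
    ∀ (va ra : Int), h ∈ L → (∀ x ∈ L, x = h ∨ ltP h x) → h.1 < va →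
    L.Pairwise (fun a b => a.2.1 < b.2.1) →
    L.foldl pvSel (ra, some va) = (h.2.1, some h.1) := by
  induction L with
  | nil => intro va ra hmem _ _ _; cases hmem
  | cons c L' ih =>
    intro va ra hmem hmin hlt hpw
    rcases List.pairwise_cons.mp hpw with ⟨hcL, hpw'⟩
    by_cases hch : c = h
    · subst hch
      have hstep : pvSel (ra, some va) c = (c.2.1, some c.1) := by simp [pvSel, pvLtInf, hlt]
      simp only [List.foldl_cons, hstep]
      exact min_keep L' c (fun x hx => hmin x (List.mem_cons_of_mem _ hx)) hcL
    · have hltP : ltP h c := (hmin c List.mem_cons_self).resolve_left hch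
      have hhL' : h ∈ L' := (List.mem_cons.mp hmem).resolve_left (fun e => hch e.symm)
      have hv : h.1 < c.1 := ltP_fst_lt hltP (hcL h hhL')
      by_cases hca : c.1 < va
      · have hstep : pvSel (ra, some va) c = (c.2.1, some c.1) := by simp [pvSel, pvLtInf, hca]
        simp only [List.foldl_cons, hstep]
        exact ih c.1 c.2.1 hhL' (fun x hx => hmin x (List.mem_cons_of_mem _ hx)) hv hpw'
      · have hstep : pvSel (ra, some va) c = (ra, some va) := by simp [pvSel, pvLtInf, hca]
        simp only [List.foldl_cons, hstep]
        exact ih va ra hhL' (fun x hx => hmin x (List.mem_cons_of_mem _ hx)) hlt hpw'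

theorem fold_min (L : List (Int × Int × List Int)) (h : Int × Int × List Int)
    (hmem : h ∈ L) (hmin : ∀ x ∈ L, x = h ∨ ltP h x)
    (hpw : L.Pairwise (fun a b => a.2.1 < b.2.1)) :
    L.foldl pvSel (-1, none) = (h.2.1, some h.1) := by
  cases L with
  | nil => cases hmem
  | cons c L' =>
    rcases List.pairwise_cons.mp hpw with ⟨hcL, hpw'⟩
    have hstep : pvSel (-1, none) c = (c.2.1, some c.1) := by simp [pvSel, pvLtInf]
    simp only [List.foldl_cons, hstep]
    by_cases hch : c = h
    · subst hch
      exact min_keep L' c (fun x hx => hmin x (List.mem_cons_of_mem _ hx)) hcL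
    · have hltP : ltP h c := (hmin c List.mem_cons_self).resolve_left hch
      have hhL' : h ∈ L' := (List.mem_cons.mp hmem).resolve_left (fun e => hch e.symm)
      have hv : h.1 < c.1 := ltP_fst_lt hltP (hcL h hhL')
      exact fold_min_acc L' h c.1 c.2.1 hhL'
        (fun x hx => hmin x (List.mem_cons_of_mem _ hx)) hv hpw'

theorem foldA_eq (T1 : List (List Int)) (idxs : List Nat) (acc : Int × Option Int) :
    (List.range T1.length).foldl (pvScanStep T1 idxs) acc
      = (activeList T1 idxs).foldl pvSel acc := by
  unfold activeList
  rw [List.foldl_filterMap]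
  apply List.foldl_ext
  intro a r _
  by_cases hi : idxs.getD r 0 < (T1.getD r []).length
  · simp only [pvScanStep, activeF, pvSel, if_pos hi]
  · simp only [pvScanStep, activeF, if_neg hi]

theorem activeF_r (T1 : List (List Int)) (idxs : List Nat) (r : Nat)
    (x : Int × Int × List Int) (h : activeF T1 idxs r = some x) : x.2.1 = (r : Int) := by
  simp only [activeF] at h
  by_cases hi : idxs.getD r 0 < (T1.getD r []).length
  · rw [if_pos hi] at h
    obtain rfl := Option.some_inj.mp h
    rfl
  · rw [if_neg hi] at h
    cases h

theorem activeList_pairwise (T1 : List (List Int)) (idxs : List Nat) :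
    (activeList T1 idxs).Pairwise (fun a b => a.2.1 < b.2.1) := by
  unfold activeList
  rw [List.pairwise_filterMap]
  refine List.Pairwise.imp ?_ List.pairwise_lt_range
  intro a b hab x hx y hy
  rw [activeF_r _ _ _ _ hx, activeF_r _ _ _ _ hy]
  exact_mod_cast hab

theorem activeF_congr (T1 : List (List Int)) (idxs2 idxs : List Nat) (r : Nat)
    (h : idxs2.getD r 0 = idxs.getD r 0) : activeF T1 idxs2 r = activeF T1 idxs r := by
  unfold activeF
  rw [h]

theorem range_split (n r : Nat) (hr : r < n) :
    List.range n = List.range' 0 r ++ r :: List.range' (r+1) (n - r - 1) := by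
  rw [List.range_eq_range']
  have h1 : n = r + (n - r) := by omega
  have h2 : n - r = (n - r - 1) + 1 := by omega
  calc List.range' 0 n = List.range' 0 (r + (n - r)) := by rw [← h1]
    _ = List.range' 0 r ++ List.range' (0 + 1 * r) (n - r) := (List.range'_append).symm
    _ = List.range' 0 r ++ List.range' r ((n - r - 1) + 1) := by rw [← h2]; norm_num
    _ = List.range' 0 r ++ r :: List.range' (r+1) (n - r - 1) := by rw [List.range'_succ]

theorem active_decomp (T1 : List (List Int)) (idxs2 idxs : List Nat) (r : Nat)
    (hr : r < T1.length)
    (hagree : ∀ r', r' ≠ r → idxs2.getD r' 0 = idxs.getD r' 0) :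
    activeList T1 idxs2
      = (List.range' 0 r).filterMap (activeF T1 idxs)
        ++ ((activeF T1 idxs2 r).toList
          ++ (List.range' (r+1) (T1.length - r - 1)).filterMap (activeF T1 idxs)) := by
  unfold activeList
  rw [range_split T1.length r hr, List.filterMap_append]
  congr 1
  · exact List.filterMap_congr (fun a ha => activeF_congr T1 idxs2 idxs a
      (hagree a (by rcases List.mem_range'_1.mp ha with ⟨_, h2⟩; omega)))
  · have hrest : (List.range' (r+1) (T1.length - r - 1)).filterMap (activeF T1 idxs2)
        = (List.range' (r+1) (T1.length - r - 1)).filterMap (activeF T1 idxs) :=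
      List.filterMap_congr (fun a ha => activeF_congr T1 idxs2 idxs a
        (hagree a (by rcases List.mem_range'_1.mp ha with ⟨h1, _⟩; omega)))
    cases hfr : activeF T1 idxs2 r with
    | none => simp [hfr, hrest]
    | some e => simp [hfr, hrest]

theorem chunk_mem_bounds (T1 : List (List Int)) (idxs : List Nat) (s k : Nat)
    (x : Int × Int × List Int)
    (h : x ∈ (List.range' s k).filterMap (activeF T1 idxs)) :
    (s : Int) ≤ x.2.1 ∧ x.2.1 < ((s + k : Nat) : Int) := by
  rcases List.mem_filterMap.mp h with ⟨a, ha, hfa⟩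
  rcases List.mem_range'_1.mp ha with ⟨h1, h2⟩
  rw [activeF_r _ _ _ _ hfa]
  exact ⟨by exact_mod_cast h1, by exact_mod_cast h2⟩

theorem wsum_perm {h1 h2 : List (Int × Int × List Int)} (h : h1.Perm h2) : wsum h1 = wsum h2 :=
  (h.map _).sum_eq

theorem wsum_cons (e : Int × Int × List Int) (l : List (Int × Int × List Int)) :
    wsum (e :: l) = 1 + e.2.2.length + wsum l := by
  simp [wsum]

theorem sum_getD_range (T1 : List (List Int)) (g : List Int → Nat) :
    ((List.range T1.length).map (fun r => g (T1.getD r []))).sum = (T1.map g).sum := by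
  induction T1 with
  | nil => simp
  | cons row T ih =>
    have hstep : ((List.range T.length).map (fun r => g ((row :: T).getD (r+1) []))).sum
        = ((List.range T.length).map (fun r => g (T.getD r []))).sum := by
      apply congrArg
      apply List.map_congr_left
      intro r _
      rfl
    calc ((List.range (row :: T).length).map (fun r => g ((row :: T).getD r []))).sum
        = g row + ((List.range T.length).map (fun r => g ((row :: T).getD (r+1) []))).sum := by
          rw [List.length_cons, List.range_succ_eq_map, List.map_cons, List.sum_cons,
            List.map_map]
          rfl
      _ = g row + ((List.range T.length).map (fun r => g (T.getD r []))).sum := by rw [hstep]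
      _ = ((row :: T).map g).sum := by rw [ih]; simp

theorem sum_filterMap_le {α β : Type} (l : List α) (f : α → Option β) (w : β → Nat) (g : α → Nat)
    (h : ∀ a ∈ l, ∀ x, f a = some x → w x ≤ g a) :
    ((l.filterMap f).map w).sum ≤ (l.map g).sum := by
  induction l with
  | nil => simp
  | cons a l' ih =>
    rw [List.filterMap_cons]
    have ih' := ih (fun a' ha' x hx => h a' (List.mem_cons_of_mem _ ha') x hx)
    cases hfa : f a with
    | none =>
      simp only [List.map_cons, List.sum_cons]
      exact le_trans ih' (Nat.le_add_left _ _)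
    | some x =>
      simp only [List.map_cons, List.sum_cons]
      exact Nat.add_le_add (h a List.mem_cons_self x hfa) ih'

theorem wsum_active_le (T1 : List (List Int)) :
    wsum (activeList T1 (List.replicate T1.length 0)) ≤ (T1.map List.length).sum := by
  unfold wsum activeList
  rw [← sum_getD_range T1 List.length]
  apply sum_filterMap_le
  intro r hr x hx
  simp only [activeF] at hx
  by_cases hi : (List.replicate T1.length 0).getD r 0 < (T1.getD r []).length
  · rw [if_pos hi] at hx
    obtain rfl := Option.some_inj.mp hx
    have h0 : (List.replicate T1.length 0).getD r 0 = 0 :=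
      List.getD_replicate 0 (List.mem_range.mp hr)
    rw [h0] at hi
    show 1 + ((T1.getD r []).drop ((List.replicate T1.length 0).getD r 0 + 1)).length
        ≤ (T1.getD r []).length
    rw [h0, List.length_drop]
    omega
  · rw [if_neg hi] at hx
    cases hx

theorem init_fold_perm (lp : List (Int × List Int)) :
    ∀ (acc : List (Int × Int × List Int)), ((lp.foldl (fun (hs : List (Int × Int × List Int)) (p : Int × List Int) => match p.2 with
        | [] => hs
        | w :: ws => pvInsort (w, p.1, ws) hs) acc)).Perm
      ((lp.filterMap (fun (p : Int × List Int) => match p.2 with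
        | [] => none
        | w :: ws => some (w, p.1, ws))) ++ acc) := by
  induction lp with
  | nil => intro acc; simp
  | cons p lp' ih =>
    intro acc
    cases hp : p.2 with
    | nil =>
      simp only [List.foldl_cons, List.filterMap_cons, hp]
      exact ih acc
    | cons w ws =>
      simp only [List.foldl_cons, List.filterMap_cons, hp]
      refine (ih (pvInsort (w, p.1, ws) acc)).trans ?_
      have h1 : (pvInsort (w, p.1, ws) acc).Perm ((w, p.1, ws) :: acc) := insort_perm _ _
      exact (List.Perm.append_left _ h1).trans List.perm_middle

theorem init_fold_sorted (lp : List (Int × List Int)) :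
    ∀ (acc : List (Int × Int × List Int)), lp.Pairwise (fun p q => p.1 < q.1) → acc.Pairwise ltP →
      (∀ p ∈ lp, ∀ y ∈ acc, y.2.1 < p.1) →
      (lp.foldl (fun (hs : List (Int × Int × List Int)) (p : Int × List Int) => match p.2 with
        | [] => hs
        | w :: ws => pvInsort (w, p.1, ws) hs) acc).Pairwise ltP := by
  induction lp with
  | nil => intro acc _ hacc _; simpa using hacc
  | cons p lp' ih =>
    intro acc hlp hacc hbound
    rcases List.pairwise_cons.mp hlp with ⟨hp, hlp'⟩
    cases hq : p.2 with
    | nil =>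
      simp only [List.foldl_cons, hq]
      exact ih acc hlp' hacc (fun q hql y hy => hbound q (List.mem_cons_of_mem _ hql) y hy)
    | cons w ws =>
      simp only [List.foldl_cons, hq]
      apply ih _ hlp'
      · exact insort_sorted _ _ hacc
          (fun y hy => ne_of_gt (hbound p List.mem_cons_self y hy))
      · intro q hql y hy
        have := (insort_perm (w, p.1, ws) acc).mem_iff.mp hy
        rcases List.mem_cons.mp this with rfl | hy'
        · exact hp q hql
        · exact hbound q (List.mem_cons_of_mem _ hql) y hy'

theorem loopA_step (T1 : List (List Int)) (idxs : List Nat) (outIdx : Nat)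
    (last : Option Int) (T2 : List Int) (fa : Nat) :
    pvLoopA T1 (fa+1) idxs outIdx last T2
      = (let m := (List.range T1.length).foldl (pvScanStep T1 idxs) (-1, none)
         if m.1 = -1 then T2
         else
           let v := m.2.getD 0
           let idxs' := idxs.set m.1.toNat (idxs.getD m.1.toNat 0 + 1)
           if some v ≠ last then pvLoopA T1 fa idxs' (outIdx + 1) (some v) (T2.set outIdx v)
           else pvLoopA T1 fa idxs' outIdx last T2) := rfl

theorem init_filterMap (T1 : List (List Int)) : ∀ (s : Int),
    (PySem.List.enumerate T1 s).filterMap (fun (p : Int × List Int) => match p.2 with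
      | [] => none
      | w :: ws => some (w, p.1, ws))
    = (List.range T1.length).filterMap (fun r => match T1.getD r [] with
      | [] => none
      | w :: ws => some (w, s + (r : Int), ws)) := by
  induction T1 with
  | nil => intro s; simp [PySem.List.enumerate_nil]
  | cons row T ih =>
    intro s
    rw [PySem.List.enumerate_cons, List.filterMap_cons, List.length_cons,
      List.range_succ_eq_map, List.filterMap_cons, List.filterMap_map, ih (s+1)]
    have htail : List.filterMap ((fun r => match (row :: T).getD r [] with
          | [] => none
          | w :: ws => some (w, s + (r : Int), ws)) ∘ Nat.succ) (List.range T.length)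
        = List.filterMap (fun r => match T.getD r [] with
          | [] => none
          | w :: ws => some (w, (s+1) + (r : Int), ws)) (List.range T.length) := by
      apply List.filterMap_congr
      intro r _
      show (match T.getD r [] with
        | [] => none
        | w :: ws => some (w, s + ((r+1 : Nat) : Int), ws))
        = (match T.getD r [] with
        | [] => none
        | w :: ws => some (w, (s+1) + (r : Int), ws))
      cases T.getD r [] with
      | nil => rfl
      | cons w ws =>
        have : s + ((r+1 : Nat) : Int) = (s+1) + (r : Int) := by push_cast; ring
        rw [this]
    rw [htail]
    cases row with
    | nil => rfl
    | cons w ws =>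
      show (w, s, ws) :: _ = (w, s + ((0:Nat) : Int), ws) :: _
      norm_num

theorem init_perm (T1 : List (List Int)) :
    (pvInitHeads T1).Perm (activeList T1 (List.replicate T1.length 0)) := by
  unfold pvInitHeads
  refine (init_fold_perm _ []).trans ?_
  rw [List.append_nil, init_filterMap T1 0]
  have hact : activeList T1 (List.replicate T1.length 0)
      = (List.range T1.length).filterMap (fun r => match T1.getD r [] with
          | [] => none
          | w :: ws => some (w, (0 : Int) + (r : Int), ws)) := by
    unfold activeList
    apply List.filterMap_congr
    intro r hr
    have h0 : (List.replicate T1.length 0).getD r 0 = 0 :=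
      List.getD_replicate 0 (List.mem_range.mp hr)
    simp only [activeF, h0]
    cases hrow : T1.getD r [] with
    | nil => simp
    | cons w ws => simp
  rw [hact]

theorem init_sorted (T1 : List (List Int)) : (pvInitHeads T1).Pairwise ltP := by
  unfold pvInitHeads
  exact init_fold_sorted _ [] (PySem.List.pairwise_lt_enumerate T1 0) List.Pairwise.nil
    (by simp)

-- B's accumulator loop is the pure output sequence appended to the accumulator
theorem loopB_outB (f : Nat) : ∀ (hs : List (Int × Int × List Int)) (merged : List Int),
    pvLoopB f hs merged = merged ++ outB f hs merged.getLast? := by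
  induction f with
  | zero => intro hs merged; simp [pvLoopB, outB]
  | succ f ih =>
    intro hs merged
    cases hs with
    | nil => simp [pvLoopB, outB]
    | cons e t =>
      obtain ⟨v, r, rest⟩ := e
      have hm' : (if merged.getLast? ≠ some v then merged ++ [v] else merged)
          = merged ++ (if merged.getLast? ≠ some v then [v] else []) := by
        split <;> simp
      have hlast : (if merged.getLast? ≠ some v then merged ++ [v] else merged).getLast?
          = some v := by
        split
        · simp
        · rename_i h; simpa using h
      cases rest with
      | nil =>
        show pvLoopB f t _ = merged ++ ((if merged.getLast? ≠ some v then [v] else []) ++ outB f t (some v))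
        rw [ih t _, hlast, hm', List.append_assoc]
      | cons w ws =>
        show pvLoopB f (pvInsort (w, r, ws) t) _
            = merged ++ ((if merged.getLast? ≠ some v then [v] else []) ++ outB f (pvInsort (w, r, ws) t) (some v))
        rw [ih _ _, hlast, hm', List.append_assoc]

theorem outB_len_le_wsum (f : Nat) : ∀ (hs : List (Int × Int × List Int)) (last : Option Int),
    (outB f hs last).length ≤ wsum hs := by
  induction f with
  | zero => intro hs last; simp [outB]
  | succ f ih =>
    intro hs last
    cases hs with
    | nil => simp [outB]
    | cons e t =>
      obtain ⟨v, r, rest⟩ := e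
      rw [wsum_cons]
      have hemit : (if last ≠ some v then [v] else ([] : List Int)).length ≤ 1 := by
        split <;> simp
      cases rest with
      | nil =>
        show ((if last ≠ some v then [v] else []) ++ outB f t (some v)).length ≤ _
        rw [List.length_append]
        have := ih t (some v)
        simp only [List.length_nil]
        omega
      | cons w ws =>
        show ((if last ≠ some v then [v] else [])
            ++ outB f (pvInsort (w, r, ws) t) (some v)).length ≤ _
        rw [List.length_append]
        have h1 := ih (pvInsort (w, r, ws) t) (some v)
        rw [wsum_perm (insort_perm _ _), wsum_cons] at h1
        simp only [List.length_cons] at *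
        omega

theorem setSeq_append : ∀ (emit tail T2 : List Int) (i : Nat),
    setSeq T2 i (emit ++ tail) = setSeq (setSeq T2 i emit) (i + emit.length) tail := by
  intro emit
  induction emit with
  | nil => intro tail T2 i; simp [setSeq]
  | cons a l ih =>
    intro tail T2 i
    show setSeq (T2.set i a) (i+1) (l ++ tail) = _
    rw [ih tail (T2.set i a) (i+1)]
    have harith : i + (a :: l).length = i + 1 + l.length := by simp; omega
    rw [harith]
    rfl

-- ==== the simulation: A's fueled loop writes exactly the pure output sequence ====
theorem simLoop (T1 : List (List Int)) (fb : Nat) :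
    ∀ (idxs : List Nat) (heads : List (Int × Int × List Int)) (outIdx : Nat)
      (last : Option Int) (T2c : List Int),
    idxs.length = T1.length →
    heads.Perm (activeList T1 idxs) →
    heads.Pairwise ltP →
    wsum heads ≤ fb →
    pvLoopA T1 (fb+1) idxs outIdx last T2c = setSeq T2c outIdx (outB fb heads last) := by
  induction fb with
  | zero =>
    intro idxs heads outIdx last T2c hlen hperm hsort hfuel
    have hnil : heads = [] := by
      cases heads with
      | nil => rfl
      | cons e t => rw [wsum_cons] at hfuel; omega
    subst hnil
    rw [loopA_step, foldA_eq, hperm.symm.eq_nil]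
    simp [outB, setSeq]
  | succ f ih =>
    intro idxs heads outIdx last T2c hlen hperm hsort hfuel
    cases heads with
    | nil =>
      rw [loopA_step, foldA_eq, hperm.symm.eq_nil]
      simp [outB, setSeq]
    | cons e t =>
      obtain ⟨v, r0, rest⟩ := e
      have hmemA : (v, r0, rest) ∈ activeList T1 idxs := hperm.subset List.mem_cons_self
      obtain ⟨r, hrrange, hfr⟩ := List.mem_filterMap.mp hmemA
      have hrn : r < T1.length := List.mem_range.mp hrrange
      have hr0 : (v, r0, rest).2.1 = ((r : Nat) : Int) := activeF_r _ _ _ _ hfr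
      simp only [] at hr0
      have hiact : idxs.getD r 0 < (T1.getD r []).length := by
        by_contra hc
        simp only [activeF, if_neg hc] at hfr
        exact absurd hfr (by simp)
      have hfr1 : activeF T1 idxs r
          = some ((T1.getD r []).getD (idxs.getD r 0) 0, (r : Int),
              (T1.getD r []).drop (idxs.getD r 0 + 1)) := by
        simp only [activeF, if_pos hiact]
      have hkey := hfr1.symm.trans hfr
      have hv : v = (T1.getD r []).getD (idxs.getD r 0) 0 :=
        (congrArg Prod.fst (Option.some_inj.mp hkey)).symm
      have hrest : rest = (T1.getD r []).drop (idxs.getD r 0 + 1) :=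
        (congrArg (fun x => x.2.2) (Option.some_inj.mp hkey)).symm
      have hminAll : ∀ x ∈ activeList T1 idxs, x = (v, r0, rest) ∨ ltP (v, r0, rest) x := by
        intro x hx
        have hx' : x ∈ (v, r0, rest) :: t := hperm.symm.subset hx
        rcases List.mem_cons.mp hx' with rfl | hxt
        · exact Or.inl rfl
        · exact Or.inr ((List.pairwise_cons.mp hsort).1 x hxt)
      have hscan : (List.range T1.length).foldl (pvScanStep T1 idxs) (-1, none)
          = ((r : Int), some v) := by
        rw [foldA_eq]
        have hfm := fold_min (activeList T1 idxs) (v, r0, rest) hmemA hminAll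
          (activeList_pairwise T1 idxs)
        simpa [hr0] using hfm
      have hne1 : ¬ (((r : Nat) : Int) = -1) := by
        have : (0:Int) ≤ (r:Int) := Int.natCast_nonneg r
        omega
      have hA : pvLoopA T1 (f+1+1) idxs outIdx last T2c
          = if some v ≠ last then
              pvLoopA T1 (f+1) (idxs.set r (idxs.getD r 0 + 1)) (outIdx + 1) (some v)
                (T2c.set outIdx v)
            else
              pvLoopA T1 (f+1) (idxs.set r (idxs.getD r 0 + 1)) outIdx last T2c := by
        rw [loopA_step, hscan]
        simp only [if_neg hne1, Option.getD_some, Int.toNat_natCast]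
      -- state decompositions
      have hdec1 := active_decomp T1 idxs idxs r hrn (fun _ _ => rfl)
      rw [hfr] at hdec1
      simp only [Option.toList_some] at hdec1
      have hpermt : t.Perm ((List.range' 0 r).filterMap (activeF T1 idxs)
          ++ (List.range' (r+1) (T1.length - r - 1)).filterMap (activeF T1 idxs)) := by
        have h1 : ((v, r0, rest) :: t).Perm ((v, r0, rest)
            :: ((List.range' 0 r).filterMap (activeF T1 idxs)
              ++ (List.range' (r+1) (T1.length - r - 1)).filterMap (activeF T1 idxs))) := by
          refine hperm.trans ?_
          rw [hdec1]
          exact List.perm_middle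
        exact h1.cons_inv
      have hagree : ∀ r', r' ≠ r →
          (idxs.set r (idxs.getD r 0 + 1)).getD r' 0 = idxs.getD r' 0 := by
        intro r' hne'
        simp only [List.getD_eq_getElem?_getD]
        rw [List.getElem?_set_ne (fun h => hne' h.symm)]
      have hdec2 := active_decomp T1 (idxs.set r (idxs.getD r 0 + 1)) idxs r hrn hagree
      have hsetD : (idxs.set r (idxs.getD r 0 + 1)).getD r 0 = idxs.getD r 0 + 1 := by
        rw [List.getD_eq_getElem?_getD,
          List.getElem?_set_self (by omega : r < idxs.length)]
        rfl
      have hA1lt : ∀ x ∈ (List.range' 0 r).filterMap (activeF T1 idxs),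
          x.2.1 < (r : Int) := by
        intro x hx
        have := chunk_mem_bounds T1 idxs 0 r x hx
        simpa using this.2
      have hA2gt : ∀ x ∈ (List.range' (r+1) (T1.length - r - 1)).filterMap (activeF T1 idxs),
          (r : Int) < x.2.1 := by
        intro x hx
        have h1 := (chunk_mem_bounds T1 idxs (r+1) (T1.length - r - 1) x hx).1
        have : ((r:Nat):Int) + 1 ≤ x.2.1 := by push_cast at h1 ⊢; omega
        omega
      have hsort_t : t.Pairwise ltP := (List.pairwise_cons.mp hsort).2
      have hwsum : wsum ((v, r0, rest) :: t) = 1 + rest.length + wsum t := wsum_cons _ _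
      have hlen' : (idxs.set r (idxs.getD r 0 + 1)).length = T1.length := by
        rw [List.length_set]; exact hlen
      -- A's two branches collapse to one setSeq step over the emitted prefix
      have hA2step : pvLoopA T1 (f+1+1) idxs outIdx last T2c
          = pvLoopA T1 (f+1) (idxs.set r (idxs.getD r 0 + 1))
              (outIdx + (if last ≠ some v then [v] else ([] : List Int)).length)
              (some v)
              (setSeq T2c outIdx (if last ≠ some v then [v] else [])) := by
        rw [hA]
        by_cases hd : last = some v
        · have h1 : ¬ (some v ≠ last) := fun hne => hne hd.symm
          have h2 : ¬ (last ≠ some v) := fun hne => hne hd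
          simp only [if_neg h1, if_neg h2, List.length_nil, Nat.add_zero, setSeq]
          rw [hd]
        · have h1 : some v ≠ last := fun heq => hd heq.symm
          simp only [if_pos h1, if_pos hd, List.length_cons, List.length_nil, setSeq]
      cases rest with
      | nil =>
        have hnotlt : ¬ (idxs.getD r 0 + 1 < (T1.getD r []).length) := by
          have hdn : (T1.getD r []).drop (idxs.getD r 0 + 1) = [] := hrest.symm
          have := List.drop_eq_nil_iff.mp hdn
          omega
        have hfr2 : activeF T1 (idxs.set r (idxs.getD r 0 + 1)) r = none := by
          simp only [activeF, hsetD]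
          rw [if_neg hnotlt]
        have hact' : activeList T1 (idxs.set r (idxs.getD r 0 + 1))
            = (List.range' 0 r).filterMap (activeF T1 idxs)
              ++ (List.range' (r+1) (T1.length - r - 1)).filterMap (activeF T1 idxs) := by
          rw [hdec2, hfr2]
          simp
        have hout : outB (f+1) ((v, r0, []) :: t) last
            = (if last ≠ some v then [v] else []) ++ outB f t (some v) := rfl
        rw [hout, hA2step]
        have hih := ih (idxs.set r (idxs.getD r 0 + 1)) t
          (outIdx + (if last ≠ some v then [v] else ([] : List Int)).length) (some v)
          (setSeq T2c outIdx (if last ≠ some v then [v] else []))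
          hlen' (by rw [hact']; exact hpermt) hsort_t
          (by
            rw [hwsum] at hfuel
            simp only [List.length_nil] at hfuel
            omega)
        rw [hih, setSeq_append]
      | cons w ws =>
        have hlt2 : idxs.getD r 0 + 1 < (T1.getD r []).length := by
          by_contra hc
          have hdn : (T1.getD r []).drop (idxs.getD r 0 + 1) = [] :=
            List.drop_eq_nil_iff.mpr (by omega)
          have := hrest.trans hdn
          simp at this
        have hw : (T1.getD r []).getD (idxs.getD r 0 + 1) 0 = w := by
          have h1 : ((T1.getD r []).drop (idxs.getD r 0 + 1))[0]? = some w := by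
            rw [← hrest]
            rfl
          rw [List.getElem?_drop] at h1
          have h1' : (T1.getD r [])[idxs.getD r 0 + 1]? = some w := by simpa using h1
          rw [List.getD_eq_getElem?_getD, h1']
          rfl
        have hws : (T1.getD r []).drop (idxs.getD r 0 + 1 + 1) = ws := by
          have h1 : ((T1.getD r []).drop (idxs.getD r 0 + 1)).drop 1 = ws := by
            rw [← hrest]
            rfl
          rw [List.drop_drop] at h1
          exact h1
        have hfr2 : activeF T1 (idxs.set r (idxs.getD r 0 + 1)) r
            = some (w, (r : Int), ws) := by
          simp only [activeF, hsetD]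
          rw [if_pos hlt2, hw, hws]
        have hact' : activeList T1 (idxs.set r (idxs.getD r 0 + 1))
            = (List.range' 0 r).filterMap (activeF T1 idxs)
              ++ (w, (r : Int), ws) :: (List.range' (r+1) (T1.length - r - 1)).filterMap
                  (activeF T1 idxs) := by
          rw [hdec2, hfr2]
          simp
        have hpermH' : (pvInsort (w, r0, ws) t).Perm
            (activeList T1 (idxs.set r (idxs.getD r 0 + 1))) := by
          refine (insort_perm _ _).trans ?_
          rw [hact', hr0]
          exact (hpermt.cons _).trans List.perm_middle.symm
        have hsortH' : (pvInsort (w, r0, ws) t).Pairwise ltP := by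
          apply insort_sorted _ _ hsort_t
          intro y hy
          have hyA := hpermt.subset hy
          rcases List.mem_append.mp hyA with h1 | h2
          · have := hA1lt y h1
            show r0 ≠ y.2.1
            rw [hr0]
            exact (ne_of_lt this).symm
          · have := hA2gt y h2
            show r0 ≠ y.2.1
            rw [hr0]
            exact ne_of_lt this
        have hwsumH' : wsum (pvInsort (w, r0, ws) t) = 1 + ws.length + wsum t := by
          rw [wsum_perm (insort_perm _ _), wsum_cons]
        have hout : outB (f+1) ((v, r0, w :: ws) :: t) last
            = (if last ≠ some v then [v] else [])
              ++ outB f (pvInsort (w, r0, ws) t) (some v) := rfl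
        rw [hout, hA2step]
        have hih := ih (idxs.set r (idxs.getD r 0 + 1)) (pvInsort (w, r0, ws) t)
          (outIdx + (if last ≠ some v then [v] else ([] : List Int)).length) (some v)
          (setSeq T2c outIdx (if last ≠ some v then [v] else []))
          hlen' hpermH' hsortH'
          (by
            rw [hwsumH']
            rw [hwsum] at hfuel
            simp only [List.length_cons] at hfuel
            omega)
        rw [hih, setSeq_append]

-- ==== sequential writes that fit are an overlay ====
theorem drop_set_high (l : List Int) (i j : Nat) (v : Int) (h : i < j) :
    (l.set i v).drop j = l.drop j := by
  rw [List.drop_set, if_pos h]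

theorem setSeq_overlay : ∀ (M T2c : List Int) (i : Nat), i + M.length ≤ T2c.length →
    setSeq T2c i M = T2c.take i ++ M ++ T2c.drop (i + M.length) := by
  intro M
  induction M with
  | nil => intro T2c i h; simp [setSeq, List.take_append_drop]
  | cons v vs ih =>
    intro T2c i h
    simp only [List.length_cons] at h
    have hi : i < T2c.length := by omega
    show setSeq (T2c.set i v) (i+1) vs = _
    rw [ih (T2c.set i v) (i+1) (by rw [List.length_set]; omega)]
    have htake : (T2c.set i v).take (i+1) = T2c.take i ++ [v] := by
      rw [List.set_eq_take_cons_drop v hi, List.take_append]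
      have hlt : (T2c.take i).length = i := by rw [List.length_take]; omega
      rw [List.take_of_length_le (by omega), hlt]
      simp
    have hdrop : (T2c.set i v).drop (i+1+vs.length) = T2c.drop (i+1+vs.length) := by
      apply drop_set_high; omega
    rw [htake, hdrop]
    have : i + (vs.length + 1) = i + 1 + vs.length := by omega
    simp only [List.length_cons, this, List.append_assoc, List.cons_append, List.nil_append]

-- ==== monotone output on sorted rows ====
theorem headsVals_mem_cons (v r0 : Int) (rest : List Int) (t : List (Int × Int × List Int))
    (x : Int) : x ∈ headsVals ((v, r0, rest) :: t) ↔ (x ∈ v :: rest ∨ x ∈ headsVals t) := by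
  simp [headsVals, or_assoc]

theorem headsVals_perm {h1 h2 : List (Int × Int × List Int)} (h : h1.Perm h2) :
    (headsVals h1).Perm (headsVals h2) := h.flatMap (fun a _ => List.Perm.refl _)

theorem outB_sorted_mem (f : Nat) : ∀ (hs : List (Int × Int × List Int)) (last : Option Int),
    (∀ e ∈ hs, entryGood e) → hs.Pairwise ltP → (hs.map (fun e => e.2.1)).Nodup →
    (∀ x ∈ headsVals hs, ∀ l, last = some l → l ≤ x) →
    (outB f hs last).Pairwise (· < ·) ∧
      (∀ y ∈ outB f hs last, (∀ l, last = some l → l < y) ∧ y ∈ headsVals hs) := by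
  induction f with
  | zero => intro hs last _ _ _ _; simp [outB]
  | succ f ih =>
    intro hs last hgood hsort hnd hlb
    cases hs with
    | nil => simp [outB]
    | cons e t =>
      obtain ⟨v, r0, rest⟩ := e
      have hgf : entryGood (v, r0, rest) := hgood _ List.mem_cons_self
      have hvmin : ∀ x ∈ headsVals ((v, r0, rest) :: t), v ≤ x := by
        intro x hx
        rcases (headsVals_mem_cons _ _ _ _ _).mp hx with hx | hx
        · rcases List.mem_cons.mp hx with rfl | hx
          · exact le_refl _
          · exact hgf.2 x hx
        · rcases List.mem_flatMap.mp hx with ⟨e', he', hxe⟩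
          have hve : v ≤ e'.1 := ltP_fst_le ((List.pairwise_cons.mp hsort).1 e' he')
          rcases List.mem_cons.mp hxe with rfl | hxe
          · exact hve
          · exact le_trans hve ((hgood e' (List.mem_cons_of_mem _ he')).2 x hxe)
      have hsort_t : t.Pairwise ltP := (List.pairwise_cons.mp hsort).2
      have hnd_t : (t.map (fun e => e.2.1)).Nodup := (List.nodup_cons.mp hnd).2
      have hr0nin : r0 ∉ t.map (fun e => e.2.1) := (List.nodup_cons.mp hnd).1
      have hgood_t : ∀ e ∈ t, entryGood e := fun e he => hgood e (List.mem_cons_of_mem _ he)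
      -- build the recursive state hs' and its facts, by cases on rest
      cases rest with
      | nil =>
        have hsub : ∀ x ∈ headsVals t, x ∈ headsVals ((v, r0, ([] : List Int)) :: t) := by
          intro x hx
          exact (headsVals_mem_cons _ _ _ _ _).mpr (Or.inr hx)
        have hlb' : ∀ x ∈ headsVals t, ∀ l, some v = some l → l ≤ x := by
          intro x hx l hl
          obtain rfl := Option.some_inj.mp hl.symm
          exact hvmin x (hsub x hx)
        obtain ⟨hpw, hmem⟩ := ih t (some v) hgood_t hsort_t hnd_t hlb'
        have hstep : outB (f+1) ((v, r0, ([] : List Int)) :: t) last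
            = (if last ≠ some v then [v] else []) ++ outB f t (some v) := rfl
        rw [hstep]
        constructor
        · -- pairwise
          by_cases hd : last = some v
          · have hcond : ¬ (last ≠ some v) := fun hne => hne hd
            simp only [if_neg hcond, List.nil_append]
            exact hpw
          · simp only [if_pos hd, List.singleton_append, List.pairwise_cons]
            exact ⟨fun y hy => ((hmem y hy).1 v rfl), hpw⟩
        · intro y hy
          rcases List.mem_append.mp hy with hy | hy
          · have hyv : y = v := by
              by_cases hd : last ≠ some v
              · rw [if_pos hd] at hy; simpa using hy
              · rw [if_neg hd] at hy; cases hy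
            refine ⟨?_, ?_⟩
            · intro l hl
              rw [hyv]
              by_cases hd : last = some v
              · exfalso
                rw [if_neg (fun h => h hd)] at hy
                cases hy
              · have hle := hlb v ((headsVals_mem_cons _ _ _ _ _).mpr
                  (Or.inl List.mem_cons_self)) l hl
                have hne : l ≠ v := fun he => hd (by rw [hl, he])
                omega
            · rw [hyv]
              exact (headsVals_mem_cons _ _ _ _ _).mpr (Or.inl List.mem_cons_self)
          · obtain ⟨hgt, hin⟩ := hmem y hy
            refine ⟨?_, hsub y hin⟩
            intro l hl
            have hvy : v < y := hgt v rfl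
            have hlv := hlb v ((headsVals_mem_cons _ _ _ _ _).mpr
              (Or.inl List.mem_cons_self)) l hl
            omega
      | cons w ws =>
        have hrestsorted : (w :: ws).Pairwise (· ≤ ·) := hgf.1
        have hgood_new : entryGood (w, r0, ws) :=
          ⟨(List.pairwise_cons.mp hrestsorted).2, (List.pairwise_cons.mp hrestsorted).1⟩
        have hgood' : ∀ e ∈ pvInsort (w, r0, ws) t, entryGood e := by
          intro e he
          rcases List.mem_cons.mp ((insort_perm _ _).mem_iff.mp he) with rfl | he
          · exact hgood_new
          · exact hgood_t e he
        have hsort' : (pvInsort (w, r0, ws) t).Pairwise ltP := by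
          apply insort_sorted _ _ hsort_t
          intro y hy hc
          have hr : r0 = y.2.1 := hc
          rw [hr] at hr0nin
          exact hr0nin (List.mem_map_of_mem hy)
        have hnd' : ((pvInsort (w, r0, ws) t).map (fun e => e.2.1)).Nodup := by
          have hp := ((insort_perm (w, r0, ws) t).map (fun e => e.2.1))
          rw [List.Perm.nodup_iff hp]
          exact List.nodup_cons.mpr ⟨hr0nin, hnd_t⟩
        have hsub : ∀ x ∈ headsVals (pvInsort (w, r0, ws) t),
            x ∈ headsVals ((v, r0, w :: ws) :: t) := by
          intro x hx
          have hx' := (headsVals_perm (insort_perm (w, r0, ws) t)).mem_iff.mp hx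
          rcases (headsVals_mem_cons _ _ _ _ _).mp hx' with hx'' | hx''
          · exact (headsVals_mem_cons _ _ _ _ _).mpr
              (Or.inl (List.mem_cons_of_mem _ hx''))
          · exact (headsVals_mem_cons _ _ _ _ _).mpr (Or.inr hx'')
        have hlb' : ∀ x ∈ headsVals (pvInsort (w, r0, ws) t), ∀ l, some v = some l → l ≤ x := by
          intro x hx l hl
          obtain rfl := Option.some_inj.mp hl.symm
          exact hvmin x (hsub x hx)
        obtain ⟨hpw, hmem⟩ := ih (pvInsort (w, r0, ws) t) (some v) hgood' hsort' hnd' hlb'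
        have hstep : outB (f+1) ((v, r0, w :: ws) :: t) last
            = (if last ≠ some v then [v] else [])
              ++ outB f (pvInsort (w, r0, ws) t) (some v) := rfl
        rw [hstep]
        constructor
        · by_cases hd : last = some v
          · have hcond : ¬ (last ≠ some v) := fun hne => hne hd
            simp only [if_neg hcond, List.nil_append]
            exact hpw
          · simp only [if_pos hd, List.singleton_append, List.pairwise_cons]
            exact ⟨fun y hy => ((hmem y hy).1 v rfl), hpw⟩
        · intro y hy
          rcases List.mem_append.mp hy with hy | hy
          · have hyv : y = v := by
              by_cases hd : last ≠ some v
              · rw [if_pos hd] at hy; simpa using hy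
              · rw [if_neg hd] at hy; cases hy
            refine ⟨?_, ?_⟩
            · intro l hl
              rw [hyv]
              by_cases hd : last = some v
              · exfalso
                rw [if_neg (fun h => h hd)] at hy
                cases hy
              · have hle := hlb v ((headsVals_mem_cons _ _ _ _ _).mpr
                  (Or.inl List.mem_cons_self)) l hl
                have hne : l ≠ v := fun he => hd (by rw [hl, he])
                omega
            · rw [hyv]
              exact (headsVals_mem_cons _ _ _ _ _).mpr (Or.inl List.mem_cons_self)
          · obtain ⟨hgt, hin⟩ := hmem y hy
            refine ⟨?_, hsub y hin⟩
            intro l hl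
            have hvy : v < y := hgt v rfl
            have hlv := hlb v ((headsVals_mem_cons _ _ _ _ _).mpr
              (Or.inl List.mem_cons_self)) l hl
            omega

-- each initial head is exactly a nonempty row of T1
theorem mem_active0 (T1 : List (List Int)) (e : Int × Int × List Int)
    (he : e ∈ activeList T1 (List.replicate T1.length 0)) :
    ∃ row ∈ T1, row = e.1 :: e.2.2 := by
  rcases List.mem_filterMap.mp he with ⟨r, hr, hfr⟩
  have hrn : r < T1.length := List.mem_range.mp hr
  have h0 : (List.replicate T1.length 0).getD r 0 = 0 :=
    List.getD_replicate 0 hrn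
  simp only [activeF, h0] at hfr
  by_cases hlen : 0 < (T1.getD r []).length
  · rw [if_pos hlen] at hfr
    refine ⟨T1.getD r [], ?_, ?_⟩
    · rw [List.getD_eq_getElem?_getD, List.getElem?_eq_getElem hrn]
      exact List.getElem_mem hrn
    · obtain rfl := (Option.some_inj.mp hfr).symm
      cases hrow : T1.getD r [] with
      | nil => rw [hrow] at hlen; simp at hlen
      | cons a l => simp
  · rw [if_neg hlen] at hfr
    cases hfr

theorem initHeads_rows_nodup (T1 : List (List Int)) :
    ((pvInitHeads T1).map (fun e => e.2.1)).Nodup := by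
  rw [List.Perm.nodup_iff ((init_perm T1).map (fun e => e.2.1))]
  have hp := List.pairwise_map.mpr (activeList_pairwise T1 (List.replicate T1.length 0))
  exact List.Pairwise.imp ne_of_lt hp

-- the merged output: strictly increasing and drawn from T1's elements, when rows are sorted
theorem outB_init_facts (T1 : List (List Int)) (f : Nat)
    (hsorted : ∀ row ∈ T1, row.Pairwise (· ≤ ·)) :
    (outB f (pvInitHeads T1) none).Pairwise (· < ·) ∧
      (∀ y ∈ outB f (pvInitHeads T1) none, y ∈ T1.flatten) := by
  have hgood : ∀ e ∈ pvInitHeads T1, entryGood e := by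
    intro e he
    obtain ⟨row, hrow, heq⟩ := mem_active0 T1 e ((init_perm T1).subset he)
    have hp := hsorted row hrow
    rw [heq] at hp
    exact ⟨(List.pairwise_cons.mp hp).2, (List.pairwise_cons.mp hp).1⟩
  obtain ⟨hpw, hmem⟩ := outB_sorted_mem f (pvInitHeads T1) none hgood (init_sorted T1)
    (initHeads_rows_nodup T1) (by intro x _ l hl; cases hl)
  refine ⟨hpw, ?_⟩
  intro y hy
  have hin := (hmem y hy).2
  have hin' := (headsVals_perm (init_perm T1)).mem_iff.mp hin
  rcases List.mem_flatMap.mp hin' with ⟨e, he, hye⟩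
  obtain ⟨row, hrow, heq⟩ := mem_active0 T1 e he
  exact List.mem_flatten.mpr ⟨row, hrow, heq ▸ hye⟩

-- the merged output fits into T2 under Pre_
theorem merged_len_le (T1 : List (List Int)) (T2 : List Int) (hpre : Pre_solve T1 T2) :
    (outB ((T1.map List.length).sum) (pvInitHeads T1) none).length ≤ T2.length := by
  rcases hpre with ⟨hsorted, hded⟩ | hsum
  · obtain ⟨hpw, hmem⟩ := outB_init_facts T1 ((T1.map List.length).sum) hsorted
    set M := outB ((T1.map List.length).sum) (pvInitHeads T1) none with hM
    have hnd : M.Nodup := hpw.imp ne_of_lt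
    have hcard : M.length = M.toFinset.card := (List.toFinset_card_of_nodup hnd).symm
    have hsub : M.toFinset ⊆ T1.flatten.toFinset := by
      intro x hx
      exact List.mem_toFinset.mpr (hmem x (List.mem_toFinset.mp hx))
    calc M.length = M.toFinset.card := hcard
      _ ≤ T1.flatten.toFinset.card := Finset.card_le_card hsub
      _ = T1.flatten.dedup.length := List.card_toFinset _
      _ ≤ T2.length := hded
  · calc (outB ((T1.map List.length).sum) (pvInitHeads T1) none).length
        ≤ wsum (pvInitHeads T1) := outB_len_le_wsum _ _ _
      _ = wsum (activeList T1 (List.replicate T1.length 0)) := wsum_perm (init_perm T1)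
      _ ≤ (T1.map List.length).sum := wsum_active_le T1
      _ ≤ T2.length := hsum

-- ===== VERDICT =====
theorem solve_spec : Claim_equal_solve := by
  unfold Claim_equal_solve
  intro T1 T2 _ hpre
  unfold Spec_solve solve solve_alt
  set M := outB ((T1.map List.length).sum) (pvInitHeads T1) none with hM
  have hA : pvLoopA T1 ((T1.map List.length).sum + 1) (List.replicate T1.length 0) 0 none T2
      = setSeq T2 0 M := by
    exact simLoop T1 ((T1.map List.length).sum) (List.replicate T1.length 0)
      (pvInitHeads T1) 0 none T2 (by simp) (init_perm T1) (init_sorted T1)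
      (by rw [wsum_perm (init_perm T1)]; exact wsum_active_le T1)
  have hB : pvLoopB ((T1.map List.length).sum) (pvInitHeads T1) [] = M := by
    rw [loopB_outB]
    rfl
  rw [hA, hB]
  have hlen : M.length ≤ T2.length := merged_len_le T1 T2 hpre
  rw [setSeq_overlay M T2 0 (by omega)]
  simp
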